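-- pv_equiv track=rewrite | github.com/justinkatz94-glitch/capture-kit | capture-kit-starter/extractors/speaking_style.py | _extract_verbal_habits
-- ===== SOURCE A (Python) =====
-- from typing import Dict, List, Any
--
-- def _extract_verbal_habits(text: str) -> List[str]:
--     """
--     Extract recurring verbal phrases/habits.
--     """
--     # Common verbal habits to look for
--     habits = [
--         "at the end of the day",
--         "let's circle back",
--         "let me be clear",
--         "i want to be clear",
--         "to be honest",
--         "honestly",
--         "the thing is",
--         "here's the thing",
--         "what i'm saying is",
--         "my point is",
--         "bottom line",
--         "long story short",
--         "that said",
--         "having said that",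
--         "in terms of",
--         "when it comes to",
--         "as i mentioned",
--         "like i said",
--         "you know what i mean",
--         "does that make sense",
--         "if that makes sense",
--         "moving forward",
--         "going forward",
--         "at this point",
--         "for what it's worth"
--     ]
--
--     found_habits = []
--     for habit in habits:
--         count = text.count(habit)
--         if count >= 1:  # Found at least once
--             found_habits.append((habit, count))
--
--     # Sort by frequency and return just the phrases
--     found_habits.sort(key=lambda x: -x[1])
--     return [habit for habit, _ in found_habits[:6]]
-- ===== SOURCE B (Python) =====
-- from typing import Dict, List, Any
--
-- def _extract_verbal_habits(text: str) -> List[str]: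
--     """
--     Extract recurring verbal phrases/habits.
--     """
--     habits = [
--         "at the end of the day",
--         "let's circle back",
--         "let me be clear",
--         "i want to be clear",
--         "to be honest",
--         "honestly",
--         "the thing is",
--         "here's the thing",
--         "what i'm saying is",
--         "my point is",
--         "bottom line",
--         "long story short",
--         "that said",
--         "having said that",
--         "in terms of",
--         "when it comes to",
--         "as i mentioned",
--         "like i said",
--         "you know what i mean",
--         "does that make sense",
--         "if that makes sense",
--         "moving forward",
--         "going forward",
--         "at this point",
--         "for what it's worth"
--     ]
--
--     # Pairs (habit, count) for every habit that occurs, in habits order.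
--     found = [(h, c) for h in habits if (c := text.count(h)) >= 1]
--
--     # Partial top-6 selection: repeatedly pull the first most-frequent pair.
--     # max() returns the FIRST maximal element, which reproduces the stable
--     # descending-by-count order exactly.
--     result: List[str] = []
--     while found and len(result) < 6:
--         best = max(found, key=lambda p: p[1])
--         result.append(best[0])
--         found.remove(best)
--     return result
-- ===== Notes on version B (the rewrite author's own statement) =====
-- stated objective: alternative
-- what changed: Replaces A's full stable sort of the (habit, count) pairs plus [:6] slice by a partial top-6 selection that repeatedly extracts the first most-frequent pair with max(..., key=...) and removes it; max's first-maximal rule reproduces the stable descending tie order exactly.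
import Mathlib
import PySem

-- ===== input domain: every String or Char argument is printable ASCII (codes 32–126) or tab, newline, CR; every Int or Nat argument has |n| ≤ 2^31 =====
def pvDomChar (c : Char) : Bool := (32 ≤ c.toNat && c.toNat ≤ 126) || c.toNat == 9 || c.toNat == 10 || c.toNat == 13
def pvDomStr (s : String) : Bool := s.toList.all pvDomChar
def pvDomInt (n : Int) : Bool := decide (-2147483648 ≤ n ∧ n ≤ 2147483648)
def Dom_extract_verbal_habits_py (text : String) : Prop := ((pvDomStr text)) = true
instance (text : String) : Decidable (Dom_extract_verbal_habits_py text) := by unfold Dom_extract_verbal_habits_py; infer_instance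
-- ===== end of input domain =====

-- B replaces A's full stable sort + slice by a partial top-6 selection
-- (repeated first-max extraction); same return value, alternative algorithm.

def pvHabits : List String := [
  "at the end of the day",
  "let's circle back",
  "let me be clear",
  "i want to be clear",
  "to be honest",
  "honestly",
  "the thing is",
  "here's the thing",
  "what i'm saying is",
  "my point is",
  "bottom line",
  "long story short",
  "that said",
  "having said that",
  "in terms of",
  "when it comes to",
  "as i mentioned",
  "like i said",
  "you know what i mean",
  "does that make sense",
  "if that makes sense",
  "moving forward",
  "going forward",
  "at this point",
  "for what it's worth"]

-- ===== PORT A =====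
def extract_verbal_habits_py (text : String) : List String :=
  -- found_habits = []; for habit in habits: count = text.count(habit); if count >= 1: append
  let found_habits : List (String × Int) :=
    pvHabits.foldl (fun acc habit =>
      let count : Int := (PySem.Str.count text habit : Int)
      if count ≥ 1 then acc ++ [(habit, count)] else acc) []
  -- found_habits.sort(key=lambda x: -x[1])
  let found_habits := PySem.List.sorted found_habits (fun x => -x.2) false
  -- [habit for habit, _ in found_habits[:6]]
  (PySem.List.slice found_habits none (some 6)).map (fun p => p.1)

-- ===== PORT B =====
-- while found and len(result) < 6: best = max(found, key=..); append best[0]; found.remove(best)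
def pvSelectTop : Nat → List (String × Int) → List String
  | 0, _ => []
  | Nat.succ k, found =>
    match PySem.List.max? found (fun p => p.2) with
    | none => []
    | some best => best.1 :: pvSelectTop k ((PySem.List.remove? found best).getD found)

def extract_verbal_habits_py_alt (text : String) : List String :=
  let found : List (String × Int) :=
    pvHabits.filterMap (fun h =>
      let c : Int := (PySem.Str.count text h : Int)
      if c ≥ 1 then some (h, c) else none)
  pvSelectTop 6 found

-- ===== PRECONDITION & SPEC =====
def Spec_extract_verbal_habits_py (text : String) (out : List String) : Prop := out = extract_verbal_habits_py_alt text
instance (text : String) (out : List String) : Decidable (Spec_extract_verbal_habits_py text out) := by unfold Spec_extract_verbal_habits_py; infer_instance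

-- ===== CLAIM (what is proved, stated in full; the proofs are below) =====
def Claim_equal_extract_verbal_habits_py : Prop := ∀ (text : String), Dom_extract_verbal_habits_py text → Spec_extract_verbal_habits_py text (extract_verbal_habits_py text)

-- ===== LEMMAS AND PROOFS =====

-- the two "found" lists coincide (A's append loop vs B's comprehension)
lemma pv_found_aux (text : String) :
    ∀ (habits : List String) (acc : List (String × Int)),
    habits.foldl (fun acc habit =>
      let count : Int := (PySem.Str.count text habit : Int)
      if count ≥ 1 then acc ++ [(habit, count)] else acc) acc
    = acc ++ habits.filterMap (fun h =>
      let c : Int := (PySem.Str.count text h : Int)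
      if c ≥ 1 then some (h, c) else none) := by
  intro habits
  induction habits with
  | nil => simp
  | cons a t ih =>
    intro acc
    simp only [List.foldl_cons, List.filterMap_cons]
    rw [ih]
    by_cases h : 1 ≤ PySem.Chars.count text.toList a.toList <;> simp [h]

lemma pv_found_eq (text : String) :
    pvHabits.foldl (fun acc habit =>
      let count : Int := (PySem.Str.count text habit : Int)
      if count ≥ 1 then acc ++ [(habit, count)] else acc) []
    = pvHabits.filterMap (fun h =>
      let c : Int := (PySem.Str.count text h : Int)
      if c ≥ 1 then some (h, c) else none) := by
  rw [pv_found_aux]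
  simp

-- insertBy with the ascending-key test preserves sortedness
lemma pv_insertBy_pairwise {α : Type} (key : α → Int) (x : α) (ys : List α)
    (h : ys.Pairwise (fun a b => key a ≤ key b)) :
    (PySem.List.insertBy (fun a b => decide (key a < key b)) x ys).Pairwise
      (fun a b => key a ≤ key b) := by
  induction ys with
  | nil => simp [PySem.List.insertBy]
  | cons y t ih =>
    rcases List.pairwise_cons.mp h with ⟨hy, ht⟩
    by_cases hxy : key x < key y
    · simp only [PySem.List.insertBy, hxy, decide_true, if_true]
      refine List.pairwise_cons.mpr ⟨?_, h⟩
      intro z hz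
      rcases List.mem_cons.mp hz with rfl | hz
      · exact le_of_lt hxy
      · exact le_trans (le_of_lt hxy) (hy z hz)
    · simp only [PySem.List.insertBy, hxy, decide_false]
      refine List.pairwise_cons.mpr ⟨?_, ih ht⟩
      intro z hz
      rcases (PySem.List.mem_insertBy _ _ _ _).mp hz with rfl | hz
      · exact le_of_not_gt hxy
      · exact hy z hz

-- stability of one insertion: on a sorted list, x lands after all equal keys
lemma pv_filter_insertBy {α : Type} (key : α → Int) (c : Int) (x : α) (ys : List α)
    (h : ys.Pairwise (fun a b => key a ≤ key b)) :
    (PySem.List.insertBy (fun a b => decide (key a < key b)) x ys).filter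
        (fun y => key y == c)
      = if key x = c then ys.filter (fun y => key y == c) ++ [x]
        else ys.filter (fun y => key y == c) := by
  induction ys with
  | nil => by_cases hc : key x = c <;> simp [PySem.List.insertBy, List.filter, hc]
  | cons y t ih =>
    rcases List.pairwise_cons.mp h with ⟨hy, ht⟩
    by_cases hxy : key x < key y
    · simp only [PySem.List.insertBy, hxy, decide_true, if_true]
      have hyt : (y :: t).filter (fun z => key z == c) = [] ∨ ¬ key x = c := by
        by_cases hc : key x = c
        · left
          rw [List.filter_eq_nil_iff]
          intro z hz
          have : key x < key z := by
            rcases List.mem_cons.mp hz with rfl | hz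
            · exact hxy
            · exact lt_of_lt_of_le hxy (hy z hz)
          simp [beq_iff_eq]
          omega
        · right; exact hc
      by_cases hc : key x = c
      · rcases hyt with hnil | hb
        · simp [hc, hnil]
        · exact absurd hc hb
      · simp [List.filter_cons, hc]
    · simp only [PySem.List.insertBy, hxy, decide_false, Bool.false_eq_true, if_false]
      rw [List.filter_cons, List.filter_cons, ih ht]
      by_cases hc : key x = c <;> by_cases hyc : key y = c <;>
        simp [hc, hyc]

-- invariant of the insertion-sort fold: key-classes grow at the back, in order
lemma pv_foldl_filter {α : Type} (key : α → Int) (c : Int) :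
    ∀ (xs acc : List α), acc.Pairwise (fun a b => key a ≤ key b) →
    (xs.foldl (fun acc x => PySem.List.insertBy (fun a b => decide (key a < key b)) x acc) acc).filter
        (fun y => key y == c)
      = acc.filter (fun y => key y == c) ++ xs.filter (fun y => key y == c) := by
  intro xs
  induction xs with
  | nil => intro acc _; simp
  | cons x t ih =>
    intro acc hacc
    simp only [List.foldl_cons]
    rw [ih _ (pv_insertBy_pairwise key x acc hacc), pv_filter_insertBy key c x acc hacc,
      List.filter_cons]
    by_cases hc : key x = c <;> simp [hc]

-- stability of the whole sort: every key-class keeps its original order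
lemma pv_sorted_filter {α : Type} (key : α → Int) (c : Int) (xs : List α) :
    (PySem.List.sorted xs key false).filter (fun y => key y == c)
      = xs.filter (fun y => key y == c) := by
  rw [PySem.List.sorted_eq_foldl_insertBy, pv_foldl_filter key c xs [] (by simp)]
  simp

-- a key-sorted list is determined by its key-class filters
lemma pv_eq_of_filters {α : Type} (key : α → Int) :
    ∀ (l₁ l₂ : List α), l₁.Pairwise (fun a b => key a ≤ key b) →
      l₂.Pairwise (fun a b => key a ≤ key b) →
      (∀ c, l₁.filter (fun y => key y == c) = l₂.filter (fun y => key y == c)) →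
      l₁ = l₂ := by
  intro l₁
  induction l₁ with
  | nil =>
    intro l₂ _ _ hf
    cases l₂ with
    | nil => rfl
    | cons b t₂ =>
      have := hf (key b)
      simp at this
  | cons a t₁ ih =>
    intro l₂ h₁ h₂ hf
    cases l₂ with
    | nil =>
      have := hf (key a)
      simp at this
    | cons b t₂ =>
      rcases List.pairwise_cons.mp h₁ with ⟨ha, ht₁⟩
      rcases List.pairwise_cons.mp h₂ with ⟨hb, ht₂⟩
      have hab : key a = key b := by
        rcases lt_trichotomy (key a) (key b) with hlt | heq | hgt
        · have heqf := hf (key a)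
          rw [List.filter_cons, List.filter_cons] at heqf
          have hane : ((key b == key a) = false) := by simp; omega
          rw [hane, beq_self_eq_true] at heqf
          simp only [if_true, Bool.false_eq_true, if_false] at heqf
          have hmem : a ∈ t₂.filter (fun y => key y == key a) :=
            heqf ▸ List.mem_cons_self
          have hle := hb a (List.mem_of_mem_filter hmem)
          omega
        · exact heq
        · have heqf := hf (key b)
          rw [List.filter_cons, List.filter_cons] at heqf
          have hane : ((key a == key b) = false) := by simp; omega
          rw [hane, beq_self_eq_true] at heqf
          simp only [if_true, Bool.false_eq_true, if_false] at heqf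
          have hmem : b ∈ t₁.filter (fun y => key y == key b) :=
            heqf.symm ▸ List.mem_cons_self
          have hle := ha b (List.mem_of_mem_filter hmem)
          omega
      have hcons := hf (key a)
      rw [List.filter_cons, List.filter_cons, beq_self_eq_true] at hcons
      have hbb : ((key b == key a) = true) := by simp [hab]
      rw [hbb] at hcons
      simp only [if_true] at hcons
      have hA : a = b := (List.cons_eq_cons.mp hcons).1
      subst hA
      have htails : ∀ c, t₁.filter (fun y => key y == c) = t₂.filter (fun y => key y == c) := by
        intro c
        have := hf c
        rw [List.filter_cons, List.filter_cons] at this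
        by_cases hc : ((key a == c) = true)
        · rw [hc] at this
          simp only [if_true] at this
          exact (List.cons_eq_cons.mp this).2
        · rw [Bool.not_eq_true] at hc
          rw [hc] at this
          simpa using this
      rw [ih t₂ ht₁ ht₂ htails]

-- the running-max fold keeps the FIRST maximal element
lemma pv_max_run {α : Type} (key : α → Int) :
    ∀ (xs : List α) (a : α),
      (xs.foldl (fun acc x => match acc with
          | none => some x
          | some m => if key m < key x then some x else some m) (some a) = some a
        ∧ ∀ y ∈ xs, key y ≤ key a)
      ∨ (∃ p m q, xs = p ++ m :: q
          ∧ xs.foldl (fun acc x => match acc with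
              | none => some x
              | some m => if key m < key x then some x else some m) (some a) = some m
          ∧ key a < key m ∧ (∀ y ∈ p, key y < key m) ∧ (∀ y ∈ q, key y ≤ key m)) := by
  intro xs
  induction xs with
  | nil => intro a; left; simp
  | cons x t ih =>
    intro a
    simp only [List.foldl_cons]
    by_cases hax : key a < key x
    · simp only [hax, if_pos]
      rcases ih x with ⟨heq, hall⟩ | ⟨p, m, q, hsplit, heq, hlt, hp, hq⟩
      · right
        exact ⟨[], x, t, by simp, heq, hax, by simp, hall⟩
      · right
        refine ⟨x :: p, m, q, by simp [hsplit], heq, lt_trans hax hlt, ?_, hq⟩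
        intro y hy
        rcases List.mem_cons.mp hy with rfl | hy
        · exact hlt
        · exact hp y hy
    · simp only [hax, if_false]
      rcases ih a with ⟨heq, hall⟩ | ⟨p, m, q, hsplit, heq, hlt, hp, hq⟩
      · left
        refine ⟨heq, ?_⟩
        intro y hy
        rcases List.mem_cons.mp hy with rfl | hy
        · omega
        · exact hall y hy
      · right
        refine ⟨x :: p, m, q, by simp [hsplit], heq, hlt, ?_, hq⟩
        intro y hy
        rcases List.mem_cons.mp hy with rfl | hy
        · omega
        · exact hp y hy

-- Python's max returns the FIRST maximal element
lemma pv_max?_first {α : Type} (key : α → Int) (xs : List α) (m : α)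
    (h : PySem.List.max? xs key = some m) :
    ∃ p q, xs = p ++ m :: q ∧ (∀ y ∈ p, key y < key m) ∧ (∀ y ∈ q, key y ≤ key m) := by
  cases xs with
  | nil => simp [PySem.List.max?] at h
  | cons x t =>
    have hfold : t.foldl (fun acc x => match acc with
        | none => some x
        | some m => if key m < key x then some x else some m) (some x) = some m := by
      simpa [PySem.List.max?] using h
    rcases pv_max_run key t x with ⟨heq, hall⟩ | ⟨p, m', q, hsplit, heq, hlt, hp, hq⟩
    · rw [heq] at hfold
      obtain rfl : x = m := by simpa using hfold
      exact ⟨[], t, by simp, by simp, hall⟩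
    · rw [heq] at hfold
      obtain rfl : m' = m := by simpa using hfold
      refine ⟨x :: p, q, by simp [hsplit], ?_, hq⟩
      intro y hy
      rcases List.mem_cons.mp hy with rfl | hy
      · exact hlt
      · exact hp y hy

-- head/tail decomposition of the stable descending sort
lemma pv_sorted_neg_head {α : Type} [BEq α] [LawfulBEq α] (key : α → Int)
    (xs : List α) (m : α) (h : PySem.List.max? xs key = some m) :
    PySem.List.sorted xs (fun y => -(key y)) false
      = m :: PySem.List.sorted ((PySem.List.remove? xs m).getD xs) (fun y => -(key y)) false := by
  rcases pv_max?_first key xs m h with ⟨p, q, rfl, hp, hq⟩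
  have hmp : m ∉ p := fun hm => absurd rfl (ne_of_lt (hp m hm))
  have herase : (PySem.List.remove? (p ++ m :: q) m).getD (p ++ m :: q) = p ++ q := by
    rw [PySem.List.remove?_eq_some_erase (p ++ m :: q) m (by simp)]
    simp [List.erase_append_right _ hmp]
  rw [herase]
  apply pv_eq_of_filters (fun y => -(key y))
  · exact PySem.List.sorted_pairwise _ _
  · refine List.pairwise_cons.mpr ⟨?_, PySem.List.sorted_pairwise _ _⟩
    intro z hz
    have hz' : z ∈ p ++ q := (PySem.List.mem_sorted _ _ _ _).mp hz
    rcases List.mem_append.mp hz' with hzp | hzq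
    · have := hp z hzp; omega
    · have := hq z hzq; omega
  · intro c
    rw [pv_sorted_filter, List.filter_cons, pv_sorted_filter]
    by_cases hc : -(key m) = c
    · have hmc : ((-(key m) == c) = true) := by simpa using hc
      rw [hmc]
      simp only [if_true]
      have hpf : p.filter (fun y => (-(key y)) == c) = [] := by
        rw [List.filter_eq_nil_iff]
        intro z hz
        have := hp z hz
        simp only [beq_iff_eq]
        omega
      simp [List.filter_append, hpf, hmc]
    · have hmc : ((-(key m) == c) = false) := by simpa using hc
      rw [hmc]
      simp [List.filter_append, hmc]

-- selection-by-first-max = take of the stable descending sort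
lemma pv_selectTop_eq (k : Nat) :
    ∀ (xs : List (String × Int)),
      pvSelectTop k xs = ((PySem.List.sorted xs (fun p => -p.2) false).take k).map (fun p => p.1) := by
  induction k with
  | zero => intro xs; simp [pvSelectTop]
  | succ k ih =>
    intro xs
    cases hmax : PySem.List.max? xs (fun p => p.2) with
    | none =>
      have : xs = [] := (PySem.List.max?_eq_none_iff _ _).mp hmax
      subst this
      simp [pvSelectTop, PySem.List.max?, PySem.List.sorted]
    | some best =>
      rw [pv_sorted_neg_head (fun p => p.2) xs best hmax]
      simp only [pvSelectTop, hmax, List.take_succ_cons, List.map_cons]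
      rw [ih]

-- ===== VERDICT (by name: the statement is the Claim_ definition above) =====
theorem extract_verbal_habits_py_spec : Claim_equal_extract_verbal_habits_py := by
  intro text _
  unfold Spec_extract_verbal_habits_py extract_verbal_habits_py extract_verbal_habits_py_alt
  simp only [pv_found_eq, pv_selectTop_eq]
  rw [PySem.List.slice_to] <;> norm_num [List.map_take, show Int.toNat 6 = 6 from rfl]
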